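-- pv_equiv track=rewrite | github.com/youhavetopay/Algorithm | SW_Academy/파이썬문제해결능력/4831.py | gotoBus
-- ===== SOURCE A (Python) =====
-- def gotoBus(canGo, dst, chargeCount, chargLocs):
--     busLoc = 0
--     count = 0
--     answer = 0
--     while True:
--         busLoc = busLoc + canGo
--
--         if busLoc >= dst:
--             return answer
--
--         for index, value in enumerate(chargLocs):
--             if value <= busLoc:
--                 count = index
--             else:
--                 break
--
--         busLoc = chargLocs[count]
--
--         answer += 1
--
--         if answer > chargeCount:
--             return 0
-- ===== SOURCE B (Python) =====
-- def gotoBus(canGo, dst, chargeCount, chargLocs):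
--     # prefix-maximum array, built once
--     pm = []
--     m = None
--     for v in chargLocs:
--         if m is None or v > m:
--             m = v
--         pm.append(m)
--     busLoc = 0
--     answer = 0
--     pos = 0
--     while True:
--         busLoc += canGo
--         if busLoc >= dst:
--             return answer
--         # binary search: number of leading stations all <= busLoc
--         lo, hi = 0, len(pm)
--         while lo < hi:
--             mid = (lo + hi) // 2
--             if pm[mid] <= busLoc:
--                 lo = mid + 1
--             else:
--                 hi = mid
--         if lo > 0:
--             pos = lo - 1
--         busLoc = chargLocs[pos]
--         answer += 1
--         if answer > chargeCount:
--             return 0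
-- ===== Notes on version B (the rewrite author's own statement) =====
-- stated objective: alternative
-- what changed: The per-refuel enumerate-and-break scan is replaced by a prefix-maximum array built once plus a hand-written binary search (bisect_right over the prefix maxima, keeping the previous index when no leading station is reachable).
import Mathlib
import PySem

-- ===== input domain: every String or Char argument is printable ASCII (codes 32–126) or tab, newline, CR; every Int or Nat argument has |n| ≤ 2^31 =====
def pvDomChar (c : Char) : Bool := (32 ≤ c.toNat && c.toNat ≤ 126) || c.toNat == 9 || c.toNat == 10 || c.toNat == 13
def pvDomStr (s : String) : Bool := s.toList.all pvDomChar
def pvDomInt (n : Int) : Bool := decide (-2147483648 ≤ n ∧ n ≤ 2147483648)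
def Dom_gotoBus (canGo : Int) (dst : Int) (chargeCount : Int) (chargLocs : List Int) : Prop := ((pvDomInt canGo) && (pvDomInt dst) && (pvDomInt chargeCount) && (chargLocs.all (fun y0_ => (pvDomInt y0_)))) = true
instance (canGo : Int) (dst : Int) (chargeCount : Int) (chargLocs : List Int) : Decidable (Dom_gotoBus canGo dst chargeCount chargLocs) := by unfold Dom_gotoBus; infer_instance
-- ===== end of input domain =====

-- B replaces A's per-refuel linear scan by a prefix-maximum array built once plus a binary search (objective: alternative algorithm, same exact result).

-- ===== PORT A =====
-- the 'for index, value in enumerate(chargLocs): if value <= busLoc: count = index else: break' scan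
def scanA (b : Int) : List Int → Nat → Nat → Nat
  | [], _, count => count
  | v :: r, i, count => if v ≤ b then scanA b r (i + 1) i else count

-- the 'while True' loop; fuel = chargeCount.toNat + 1 is never exhausted since answer
-- increases each iteration and the loop returns once answer > chargeCount
def loopA (canGo dst chargeCount : Int) (chargLocs : List Int) :
    Nat → Int → Int → Nat → Int
  | 0, _, _, _ => 0
  | fuel + 1, busLoc, answer, count =>
    let busLoc := busLoc + canGo
    if busLoc ≥ dst then answer
    else
      let count := scanA busLoc chargLocs 0 count
      let busLoc := chargLocs.getD count 0   -- chargLocs[count]; in range under Pre_gotoBus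
      let answer := answer + 1
      if answer > chargeCount then 0
      else loopA canGo dst chargeCount chargLocs fuel busLoc answer count

def gotoBus (canGo : Int) (dst : Int) (chargeCount : Int) (chargLocs : List Int) : Int :=
  loopA canGo dst chargeCount chargLocs (chargeCount.toNat + 1) 0 0 0

-- ===== PORT B =====
-- running prefix maxima (the 'm = None' loop in Source B)
def pmGo (m : Int) : List Int → List Int
  | [] => []
  | v :: r => let m' := if v > m then v else m; m' :: pmGo m' r

def buildPM : List Int → List Int
  | [] => []
  | v :: r => v :: pmGo v r

-- hand-written bisect_right: 'while lo < hi: mid = (lo+hi)//2; ...'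
def bisectR (ys : List Int) (x : Int) : Nat → Nat → Nat
  | lo, hi =>
    if _ : lo < hi then
      let mid := (lo + hi) / 2
      if ys.getD mid 0 ≤ x then bisectR ys x (mid + 1) hi
      else bisectR ys x lo mid
    else lo
  termination_by lo hi => hi - lo
  decreasing_by all_goals omega

def loopB (canGo dst chargeCount : Int) (chargLocs pm : List Int) :
    Nat → Int → Int → Nat → Int
  | 0, _, _, _ => 0
  | fuel + 1, busLoc, answer, pos =>
    let busLoc := busLoc + canGo
    if busLoc ≥ dst then answer
    else
      let k := bisectR pm busLoc 0 pm.length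
      let pos := if k > 0 then k - 1 else pos
      let busLoc := chargLocs.getD pos 0   -- chargLocs[pos]; in range under Pre_gotoBus
      let answer := answer + 1
      if answer > chargeCount then 0
      else loopB canGo dst chargeCount chargLocs pm fuel busLoc answer pos

def gotoBus_alt (canGo : Int) (dst : Int) (chargeCount : Int) (chargLocs : List Int) : Int :=
  loopB canGo dst chargeCount chargLocs (buildPM chargLocs) (chargeCount.toNat + 1) 0 0 0

-- ===== PRECONDITION & SPEC =====
-- Pre_ excludes exactly the inputs where Python A raises IndexError: an empty station list
-- while the first hop does not already reach dst (chargLocs[0] on an empty list); B raises there too.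
def Pre_gotoBus (canGo : Int) (dst : Int) (chargeCount : Int) (chargLocs : List Int) : Prop :=
  chargLocs ≠ [] ∨ canGo ≥ dst
instance (canGo : Int) (dst : Int) (chargeCount : Int) (chargLocs : List Int) : Decidable (Pre_gotoBus canGo dst chargeCount chargLocs) := by unfold Pre_gotoBus; infer_instance

def pvWitness_gotoBus : Int × Int × Int × List Int := (3, 10, 4, [1, 3, 5, 7, 9])

def Spec_gotoBus (canGo : Int) (dst : Int) (chargeCount : Int) (chargLocs : List Int) (out : Int) : Prop := out = gotoBus_alt canGo dst chargeCount chargLocs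
instance (canGo : Int) (dst : Int) (chargeCount : Int) (chargLocs : List Int) (out : Int) : Decidable (Spec_gotoBus canGo dst chargeCount chargLocs out) := by unfold Spec_gotoBus; infer_instance

-- ===== CLAIM (what is proved, stated in full; the proofs are below) =====
def Claim_equal_gotoBus : Prop := ∀ (canGo : Int) (dst : Int) (chargeCount : Int) (chargLocs : List Int), Dom_gotoBus canGo dst chargeCount chargLocs → Pre_gotoBus canGo dst chargeCount chargLocs → Spec_gotoBus canGo dst chargeCount chargLocs (gotoBus canGo dst chargeCount chargLocs)

-- ===== LEMMAS AND PROOFS =====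

-- length of the '≤ b' take-while prefix
def twLen (b : Int) : List Int → Nat
  | [] => 0
  | v :: r => if v ≤ b then twLen b r + 1 else 0

lemma scanA_eq (b : Int) (xs : List Int) : ∀ i count,
    scanA b xs i count = if twLen b xs > 0 then i + twLen b xs - 1 else count := by
  induction xs with
  | nil => intro i count; simp [scanA, twLen]
  | cons v r ih =>
    intro i count
    simp only [scanA, twLen]
    by_cases hv : v ≤ b
    · simp only [hv, if_true, ih (i + 1) i]
      by_cases h : twLen b r > 0 <;> simp [h] <;> omega
    · simp [hv]

lemma twLen_pmGo (b : Int) (xs : List Int) : ∀ m, m ≤ b → twLen b (pmGo m xs) = twLen b xs := by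
  induction xs with
  | nil => intro m _; rfl
  | cons v r ih =>
    intro m hm
    simp only [pmGo, twLen]
    by_cases hv : v ≤ b
    · have h' : (if v > m then v else m) ≤ b := by split <;> omega
      simp [h', hv, ih _ h']
    · have h' : ¬ (if v > m then v else m) ≤ b := by split <;> omega
      simp [h', hv]

lemma twLen_buildPM (b : Int) (xs : List Int) : twLen b (buildPM xs) = twLen b xs := by
  cases xs with
  | nil => rfl
  | cons v r =>
    simp only [buildPM, twLen]
    by_cases hv : v ≤ b
    · simp [hv, twLen_pmGo b r v hv]
    · simp [hv]

lemma twLen_le_length (b : Int) (ys : List Int) : twLen b ys ≤ ys.length := by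
  induction ys with
  | nil => simp [twLen]
  | cons v r ih => simp only [twLen, List.length_cons]; split <;> omega

lemma getD_lt_twLen (b : Int) (ys : List Int) : ∀ i, i < twLen b ys → ys.getD i 0 ≤ b := by
  induction ys with
  | nil => intro i h; simp [twLen] at h
  | cons v r ih =>
    intro i h
    simp only [twLen] at h
    by_cases hv : v ≤ b
    · simp only [hv, if_true] at h
      cases i with
      | zero => simpa using hv
      | succ j => simpa using ih j (by omega)
    · simp [hv] at h

lemma getD_twLen_gt (b : Int) (ys : List Int) :
    twLen b ys < ys.length → ¬ ys.getD (twLen b ys) 0 ≤ b := by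
  induction ys with
  | nil => simp [twLen]
  | cons v r ih =>
    intro h
    simp only [twLen] at *
    by_cases hv : v ≤ b
    · simp only [hv, if_true] at h ⊢
      simpa using ih (by simpa using h)
    · simpa [hv] using hv

-- the prefix-maxima list is nondecreasing
def Mono (ys : List Int) : Prop := ∀ i j, i ≤ j → j < ys.length → ys.getD i 0 ≤ ys.getD j 0

lemma chain_pmGo (xs : List Int) : ∀ m, List.IsChain (· ≤ ·) (m :: pmGo m xs) := by
  induction xs with
  | nil => intro m; simp [pmGo]
  | cons v r ih =>
    intro m
    simp only [pmGo]
    exact List.isChain_cons_cons.mpr ⟨by split <;> omega, ih _⟩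

lemma pairwise_buildPM (xs : List Int) : List.Pairwise (· ≤ ·) (buildPM xs) := by
  cases xs with
  | nil => simp [buildPM]
  | cons v r =>
    exact List.isChain_iff_pairwise.mp (chain_pmGo r v)

lemma mono_buildPM (xs : List Int) : Mono (buildPM xs) := by
  intro i j hij hj
  rcases Nat.eq_or_lt_of_le hij with rfl | hlt
  · exact le_refl _
  · have hp := (List.pairwise_iff_getElem).mp (pairwise_buildPM xs)
    have hi : i < (buildPM xs).length := by omega
    have := hp i j hi hj hlt
    rw [List.getD_eq_getElem _ _ hi, List.getD_eq_getElem _ _ hj]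
    exact this

lemma bisectR_eq_aux (ys : List Int) (x : Int) (hm : Mono ys) :
    ∀ n lo hi, hi - lo ≤ n → lo ≤ twLen x ys → twLen x ys ≤ hi → hi ≤ ys.length →
      bisectR ys x lo hi = twLen x ys := by
  intro n
  induction n with
  | zero =>
    intro lo hi hn h1 h2 _
    rw [bisectR]
    have : ¬ lo < hi := by omega
    simp only [this, dite_false]
    omega
  | succ n ih =>
    intro lo hi hn h1 h2 h3
    rw [bisectR]
    by_cases hlh : lo < hi
    · simp only [hlh, dite_true]
      have hmidlo : lo ≤ (lo + hi) / 2 := by omega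
      have hmidhi : (lo + hi) / 2 < hi := by omega
      by_cases hc : ys.getD ((lo + hi) / 2) 0 ≤ x
      · simp only [hc, if_true]
        have hT : (lo + hi) / 2 + 1 ≤ twLen x ys := by
          by_contra hcon
          have hTm : twLen x ys ≤ (lo + hi) / 2 := by omega
          have hTl : twLen x ys < ys.length := by omega
          have := getD_twLen_gt x ys hTl
          exact this (le_trans (hm _ _ hTm (by omega)) hc)
        exact ih ((lo + hi) / 2 + 1) hi (by omega) hT h2 h3
      · simp only [hc, if_false]
        have hT : twLen x ys ≤ (lo + hi) / 2 := by
          by_contra hcon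
          exact hc (getD_lt_twLen x ys _ (by omega))
        exact ih lo ((lo + hi) / 2) (by omega) h1 hT (by omega)
    · simp only [hlh, dite_false]; omega

lemma bisectR_eq (ys : List Int) (x : Int) (hm : Mono ys) :
    bisectR ys x 0 ys.length = twLen x ys :=
  bisectR_eq_aux ys x hm ys.length 0 ys.length (by omega) (by omega)
    (twLen_le_length x ys) (le_refl _)

lemma bisect_pm (xs : List Int) (b : Int) :
    bisectR (buildPM xs) b 0 (buildPM xs).length = twLen b xs := by
  rw [bisectR_eq _ _ (mono_buildPM xs), twLen_buildPM]

lemma loop_eq (canGo dst chargeCount : Int) (chargLocs : List Int) :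
    ∀ fuel busLoc answer cnt,
      loopA canGo dst chargeCount chargLocs fuel busLoc answer cnt =
      loopB canGo dst chargeCount chargLocs (buildPM chargLocs) fuel busLoc answer cnt := by
  intro fuel
  induction fuel with
  | zero => intro _ _ _; rfl
  | succ fuel ih =>
    intro busLoc answer cnt
    simp only [loopA, loopB]
    by_cases hd : busLoc + canGo ≥ dst
    · simp [hd]
    · simp only [hd, if_false]
      have hk : (if bisectR (buildPM chargLocs) (busLoc + canGo) 0 (buildPM chargLocs).length > 0
            then bisectR (buildPM chargLocs) (busLoc + canGo) 0 (buildPM chargLocs).length - 1 else cnt)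
          = scanA (busLoc + canGo) chargLocs 0 cnt := by
        rw [bisect_pm, scanA_eq]
        by_cases h : twLen (busLoc + canGo) chargLocs > 0 <;> simp [h] <;> omega
      rw [← hk]
      by_cases ha : answer + 1 > chargeCount
      · simp [ha]
      · simp only [ha, if_false]
        exact ih _ _ _

-- ===== VERDICT (by name: the statement is the Claim_ definition above) =====
theorem gotoBus_spec : Claim_equal_gotoBus := by
  intro canGo dst chargeCount chargLocs _ _
  unfold Spec_gotoBus gotoBus gotoBus_alt
  exact loop_eq canGo dst chargeCount chargLocs _ 0 0 0
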